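-- pv_equiv track=rewrite | github.com/daniel-reich/ubiquitous-fiesta | Q7oecYfjkq7tHwPoA_0.py | climb
-- ===== SOURCE A (Python) =====
-- def climb(stamina, obstacles):
--     import math
--     c = 0
--     stamina_needed = 0
--     for i in range(len(obstacles) - 1):
--         r = math.ceil(abs(obstacles[i] - obstacles[i + 1]))
--         if obstacles[i] <= obstacles[i + 1]:
--             stamina_needed = r * 2
--         if obstacles[i] > obstacles[i + 1]:
--             stamina_needed = r
--         if stamina - stamina_needed < 0:
--             break
--         stamina -= stamina_needed
--         c += 1
--     return c
-- ===== SOURCE B (Python) =====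
-- def climb(stamina, obstacles):
--     # cost table over adjacent pairs, then prefix sums, then first index exceeding stamina
--     costs = [(b - a) * 2 if a <= b else a - b for a, b in zip(obstacles, obstacles[1:])]
--     prefix = []
--     t = 0
--     for cost in costs:
--         t += cost
--         prefix.append(t)
--     return next((i for i, p in enumerate(prefix) if p > stamina), len(prefix))
-- ===== Notes on version B (the rewrite author's own statement) =====
-- stated objective: alternative
-- what changed: Replaced the single interleaved loop that mutates remaining stamina and breaks early by a three-phase pipeline: a per-step cost table over adjacent pairs, its running prefix sums, and the index of the first prefix sum exceeding stamina.
import Mathlib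
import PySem

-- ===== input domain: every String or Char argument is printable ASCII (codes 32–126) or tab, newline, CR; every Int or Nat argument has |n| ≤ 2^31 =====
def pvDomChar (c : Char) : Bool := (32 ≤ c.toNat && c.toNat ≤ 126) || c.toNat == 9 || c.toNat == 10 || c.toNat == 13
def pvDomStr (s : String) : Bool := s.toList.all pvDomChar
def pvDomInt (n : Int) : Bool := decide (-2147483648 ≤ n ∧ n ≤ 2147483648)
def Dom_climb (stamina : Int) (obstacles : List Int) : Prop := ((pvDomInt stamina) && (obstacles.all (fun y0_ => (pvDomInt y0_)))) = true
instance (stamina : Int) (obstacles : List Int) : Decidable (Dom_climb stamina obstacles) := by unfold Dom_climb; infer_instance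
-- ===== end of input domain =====

-- ===== PORT A =====
-- B replaces A's interleaved break-loop by three phases (cost table over adjacent pairs,
-- prefix sums, first index exceeding stamina); same return value (alternative decomposition).
def climbLoopA (obstacles : List Int) : List Int → Int → Int → Int → Int
  | [], _stamina, _needed, c => c
  | i :: rest, stamina, needed, c =>
    let a := PySem.List.pyGetD obstacles i 0
    let b := PySem.List.pyGetD obstacles (i + 1) 0
    let r : Int := ((a - b).natAbs : Int)   -- math.ceil(abs(..)) on ints = |a - b|
    let needed1 := if a ≤ b then r * 2 else needed
    let needed2 := if a > b then r else needed1
    if stamina - needed2 < 0 then c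
    else climbLoopA obstacles rest (stamina - needed2) needed2 (c + 1)

def climb (stamina : Int) (obstacles : List Int) : Int :=
  climbLoopA obstacles (PySem.List.pyRange 0 ((obstacles.length : Int) - 1) 1) stamina 0 0

-- ===== PORT B =====
def stepCosts (obstacles : List Int) : List Int :=
  (obstacles.zip obstacles.tail).map (fun p => if p.1 ≤ p.2 then (p.2 - p.1) * 2 else p.1 - p.2)

def prefixSums (t : Int) : List Int → List Int
  | [] => []
  | x :: xs => (t + x) :: prefixSums (t + x) xs

def climb_alt (stamina : Int) (obstacles : List Int) : Int :=
  (((prefixSums 0 (stepCosts obstacles)).findIdx (fun p => stamina < p) : Nat) : Int)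
-- ===== PRECONDITION & SPEC =====
def Spec_climb (stamina : Int) (obstacles : List Int) (out : Int) : Prop := out = climb_alt stamina obstacles
instance (stamina : Int) (obstacles : List Int) (out : Int) : Decidable (Spec_climb stamina obstacles out) := by unfold Spec_climb; infer_instance

-- ===== CLAIM (what is proved, stated in full; the proofs are below) =====
def Claim_equal_climb : Prop := ∀ (stamina : Int) (obstacles : List Int), Dom_climb stamina obstacles → Spec_climb stamina obstacles (climb stamina obstacles)

-- ===== LEMMAS AND PROOFS =====

def cnt (s : Int) : List Int → Int
  | [] => 0
  | x :: xs => if s - x < 0 then 0 else cnt (s - x) xs + 1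

theorem findIdx_prefixSums (costs : List Int) : ∀ (t stamina : Int),
    (((prefixSums t costs).findIdx (fun p => stamina < p) : Nat) : Int) = cnt (stamina - t) costs := by
  induction costs with
  | nil => intro t stamina; simp [prefixSums, cnt]
  | cons x xs ih =>
    intro t stamina
    by_cases h : stamina < t + x
    · simp [prefixSums, List.findIdx_cons, h, cnt, show stamina - t - x < 0 by omega]
    · have h2 : ¬ stamina - t - x < 0 := by omega
      simp only [prefixSums, List.findIdx_cons, cnt, h, h2, if_false, decide_false, cond_false]
      push_cast
      rw [ih (t + x) stamina]
      have : stamina - (t + x) = stamina - t - x := by ring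
      rw [this]

theorem stepCosts_short (l : List Int) (h : l.length ≤ 1) : stepCosts l = [] := by
  match l, h with
  | [], _ => simp [stepCosts]
  | [a], _ => simp [stepCosts]

theorem stepCosts_cons_cons (a b : Int) (t : List Int) :
    stepCosts (a :: b :: t) = (if a ≤ b then (b - a) * 2 else a - b) :: stepCosts (b :: t) := by
  simp [stepCosts]

theorem climbLoopA_eq (n : Nat) : ∀ (k : Nat) (full : List Int) (stamina needed c : Int),
    full.length ≤ k + n →
    climbLoopA full (PySem.List.pyRange k ((full.length : Int) - 1) 1) stamina needed c
      = c + cnt stamina (stepCosts (full.drop k)) := by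
  induction n with
  | zero =>
    intro k full stamina needed c hle
    rw [PySem.List.pyRange_one_eq_nil (by omega), List.drop_eq_nil_of_le (by omega)]
    simp [climbLoopA, stepCosts, cnt]
  | succ n ih =>
    intro k full stamina needed c hle
    by_cases hk : (k : Int) < (full.length : Int) - 1
    · have hk1 : k + 1 < full.length := by omega
      have hk0 : k < full.length := by omega
      rw [PySem.List.pyRange_one_cons hk]
      have hdk : full.drop k = full[k] :: full[k+1] :: full.drop (k + 2) := by
        rw [List.drop_eq_getElem_cons hk0, List.drop_eq_getElem_cons hk1]
      have hdk1 : full.drop (k + 1) = full[k+1] :: full.drop (k + 2) :=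
        List.drop_eq_getElem_cons hk1
      have hga : PySem.List.pyGetD full (k : Int) 0 = full[k] := by
        simp [PySem.List.pyGetD_natCast, List.getD_eq_getElem?_getD, hk0]
      have hgb : PySem.List.pyGetD full ((k : Int) + 1) 0 = full[k+1] := by
        have : ((k : Int) + 1) = ((k + 1 : Nat) : Int) := by push_cast; ring
        rw [this]
        simp only [PySem.List.pyGetD_natCast]
        simp [List.getD_eq_getElem?_getD, hk1]
      rw [hdk, stepCosts_cons_cons, ← hdk1]
      simp only [climbLoopA, hga, hgb]
      have hcast : ((k : Int) + 1) = ((k + 1 : Nat) : Int) := by push_cast; ring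
      have hrec := ih (k + 1) full
      set a := full[k] with ha
      set b := full[k+1] with hb
      by_cases hab : a ≤ b
      · have hr : ((a - b).natAbs : Int) = b - a := by omega
        have hgt : ¬ a > b := by omega
        simp only [hab, if_true, hgt, if_false, hr, cnt]
        by_cases hs : stamina - (b - a) * 2 < 0
        · simp [hs]
        · simp only [hs, if_false]
          rw [hcast, hrec (stamina - (b - a) * 2) ((b - a) * 2) (c + 1) (by omega)]
          ring
      · have hr : ((a - b).natAbs : Int) = a - b := by omega
        have hgt : a > b := by omega
        simp only [hab, if_false, hgt, if_true, hr, cnt]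
        by_cases hs : stamina - (a - b) < 0
        · simp [hs]
        · simp only [hs, if_false]
          rw [hcast, hrec (stamina - (a - b)) (a - b) (c + 1) (by omega)]
          ring
    · rw [PySem.List.pyRange_one_eq_nil (by omega),
          stepCosts_short (full.drop k) (by simp; omega)]
      simp [climbLoopA, cnt]

-- ===== VERDICT (by name: the statement is the Claim_ definition above) =====
theorem climb_spec : Claim_equal_climb := by
  intro stamina obstacles _
  unfold Spec_climb climb climb_alt
  have h := climbLoopA_eq obstacles.length 0 obstacles stamina 0 0 (by omega)
  simp only [Nat.cast_zero, List.drop_zero] at h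
  rw [h, findIdx_prefixSums (stepCosts obstacles) 0 stamina]
  simp
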